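-- pv_equiv track=rewrite | github.com/sig9org/alpine-openssl-docker | check-version.py | parse_apkindex
-- ===== SOURCE A (Python) =====
-- def parse_apkindex(text: str, package_name: str) -> str:
--     packages = text.strip().split("\n\n")
--
--     for pkg_info in packages:
--         lines = pkg_info.split("\n")
--         current_name = ""
--         current_version = ""
--
--         for line in lines:
--             if line.startswith("P:"):
--                 current_name = line[2:]
--             elif line.startswith("V:"):
--                 current_version = line[2:]
--
--         if current_name == package_name:
--             return current_version
--
--     return "(NOT FOUND)"
-- ===== SOURCE B (Python) =====
-- def _last_field(lines, tag):
--     for line in reversed(lines):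
--         if line.startswith(tag):
--             return line[2:]
--     return ""
--
--
-- def parse_apkindex(text: str, package_name: str) -> str:
--     table = {}
--     for block in text.strip().split("\n\n"):
--         lines = block.split("\n")
--         table.setdefault(_last_field(lines, "P:"), _last_field(lines, "V:"))
--     return table.get(package_name, "(NOT FOUND)")
-- ===== Notes on version B (the rewrite author's own statement) =====
-- stated objective: alternative
-- what changed: Replaces the early-returning nested state-machine scan with a build-index-then-lookup shape: each block's last P:/V: lines are found by a reverse scan, a first-wins name->version dict is built over all blocks, and the answer is one dict lookup.
import Mathlib
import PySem

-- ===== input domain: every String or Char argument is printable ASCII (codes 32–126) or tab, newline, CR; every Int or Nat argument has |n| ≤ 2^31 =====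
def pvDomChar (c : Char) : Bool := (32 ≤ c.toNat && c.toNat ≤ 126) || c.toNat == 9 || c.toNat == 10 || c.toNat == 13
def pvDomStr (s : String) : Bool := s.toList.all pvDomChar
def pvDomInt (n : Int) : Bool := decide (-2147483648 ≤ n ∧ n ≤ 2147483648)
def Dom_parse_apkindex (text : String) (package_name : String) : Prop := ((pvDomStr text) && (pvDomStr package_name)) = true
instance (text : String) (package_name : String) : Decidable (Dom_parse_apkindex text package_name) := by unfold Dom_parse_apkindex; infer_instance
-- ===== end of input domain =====

-- B replaces A's early-returning nested state-machine scan by a first-wins index built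
-- over all blocks (reverse scan per block for the last P:/V: line) followed by one lookup.

-- ===== PORT A =====
-- inner loop body of A: running (current_name, current_version) over the block's lines
def pvABlockStep (nv : String × String) (line : String) : String × String :=
  if PySem.Str.startswith line "P:" then (PySem.Str.slice line (some 2) none, nv.2)
  else if PySem.Str.startswith line "V:" then (nv.1, PySem.Str.slice line (some 2) none)
  else nv

-- A's outer for-loop with its early return
def pvALoop (package_name : String) : List String → String
  | [] => "(NOT FOUND)"
  | pkg_info :: rest =>
    let nv := ((PySem.Str.split? pkg_info "\n").getD []).foldl pvABlockStep ("", "")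
    if nv.1 = package_name then nv.2 else pvALoop package_name rest

def parse_apkindex (text : String) (package_name : String) : String :=
  pvALoop package_name ((PySem.Str.split? (PySem.Str.strip text) "\n\n").getD [])

-- ===== PORT B =====
-- Source B's _last_field: scan reversed(lines) for the first line starting with tag
def pvLastField : List String → String → String
  | [], _ => ""
  | line :: rest, tag =>
    if PySem.Str.startswith line tag then PySem.Str.slice line (some 2) none
    else pvLastField rest tag

-- body of B's for-loop: table.setdefault(name, version)
def pvSetdefaultStep (d : PySem.Dict String String) (block : String) : PySem.Dict String String :=
  let lines := (PySem.Str.split? block "\n").getD []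
  d.setdefault (pvLastField lines.reverse "P:") (pvLastField lines.reverse "V:")

def parse_apkindex_alt (text : String) (package_name : String) : String :=
  let table := ((PySem.Str.split? (PySem.Str.strip text) "\n\n").getD []).foldl pvSetdefaultStep PySem.Dict.empty
  table.getD package_name "(NOT FOUND)"

-- ===== PRECONDITION & SPEC =====
def Spec_parse_apkindex (text : String) (package_name : String) (out : String) : Prop := out = parse_apkindex_alt text package_name
instance (text : String) (package_name : String) (out : String) : Decidable (Spec_parse_apkindex text package_name out) := by unfold Spec_parse_apkindex; infer_instance

-- ===== CLAIM (what is proved, stated in full; the proofs are below) =====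
def Claim_equal_parse_apkindex : Prop := ∀ (text : String) (package_name : String), Dom_parse_apkindex text package_name → Spec_parse_apkindex text package_name (parse_apkindex text package_name)

-- ===== LEMMAS AND PROOFS =====

-- pvLastField with an explicit default (proof-only generalisation)
def pvLF (d : String) : List String → String → String
  | [], _ => d
  | line :: rest, tag =>
    if PySem.Str.startswith line tag then PySem.Str.slice line (some 2) none
    else pvLF d rest tag

theorem pvLastField_eq_pvLF (xs : List String) (tag : String) :
    pvLastField xs tag = pvLF "" xs tag := by
  induction xs with
  | nil => rfl
  | cons l rest ih => simp [pvLastField, pvLF, ih]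

theorem pvLF_append_singleton (d : String) (xs : List String) (l tag : String) :
    pvLF d (xs ++ [l]) tag
      = pvLF (if PySem.Str.startswith l tag then PySem.Str.slice l (some 2) none else d) xs tag := by
  induction xs with
  | nil => rfl
  | cons x rest ih => simp [pvLF, ih]

-- a line starting with "P:" does not start with "V:"
theorem pv_excl {cs : List Char} (h : PySem.Chars.startswith cs ['P', ':'] = true) :
    PySem.Chars.startswith cs ['V', ':'] = false := by
  rw [PySem.Chars.startswith_iff] at h
  rw [Bool.eq_false_iff]
  intro hv
  rw [PySem.Chars.startswith_iff] at hv
  obtain ⟨t, ht⟩ := h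
  obtain ⟨u, hu⟩ := hv
  rw [← ht] at hu
  simp at hu

-- A's inner loop computes exactly B's two reverse-scan lookups
theorem pvBlock_eq (lines : List String) (nv : String × String) :
    lines.foldl pvABlockStep nv
      = (pvLF nv.1 lines.reverse "P:", pvLF nv.2 lines.reverse "V:") := by
  induction lines generalizing nv with
  | nil => rfl
  | cons l rest ih =>
    simp only [List.foldl_cons, List.reverse_cons, ih, pvLF_append_singleton]
    by_cases h1 : PySem.Chars.startswith l.toList ['P', ':'] = true
    · simp [pvABlockStep, h1, pv_excl h1]
    · by_cases h2 : PySem.Chars.startswith l.toList ['V', ':'] = true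
      · simp [pvABlockStep, h1, h2]
      · simp [pvABlockStep, h1, h2]

-- the setdefault fold looked up afterwards equals A's early-returning scan
theorem pvOuter (package_name : String) (blocks : List String) (d : PySem.Dict String String) :
    (blocks.foldl pvSetdefaultStep d).getD package_name "(NOT FOUND)"
      = (d.get? package_name).getD (pvALoop package_name blocks) := by
  induction blocks generalizing d with
  | nil => simp [pvALoop, PySem.Dict.getD_eq_get?_getD]
  | cons b rest ih =>
    rw [List.foldl_cons, ih]
    show ((d.setdefault _ _).get? package_name).getD _ = _
    simp only [pvALoop, pvBlock_eq, ← pvLastField_eq_pvLF]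
    by_cases h : package_name = pvLastField ((PySem.Str.split? b "\n").getD []).reverse "P:"
    · rw [← h, PySem.Dict.get?_setdefault_self]
      cases hd : d.get? package_name <;> simp [Option.getD]
    · rw [PySem.Dict.get?_setdefault_of_ne _ _ h]
      simp [Ne.symm h]

-- ===== VERDICT (by name: the statement is the Claim_ definition above) =====
theorem parse_apkindex_spec : Claim_equal_parse_apkindex := by
  intro text package_name _
  unfold Spec_parse_apkindex parse_apkindex parse_apkindex_alt
  rw [pvOuter]
  simp [PySem.Dict.get?_empty]
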